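-- pv_equiv track=rewrite | github.com/dmitry957/codewars-training | kata/7-kyu/risk-game-battle-outcome/solution.py | battle_outcome
-- ===== SOURCE A (Python) =====
-- def battle_outcome(attacker, defender):
--     attacker_units_lost = 0
--     defender_units_lost = 0
--     for a, d in zip(sorted(attacker)[::-1], sorted(defender)[::-1]):
--         if a > d:
--             defender_units_lost += 1
--         elif a <= d:
--             attacker_units_lost += 1
--     return (attacker_units_lost, defender_units_lost)
-- ===== SOURCE B (Python) =====
-- def battle_outcome(attacker, defender):
--     atk = list(attacker)
--     dfd = list(defender)
--     attacker_lost = 0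
--     defender_lost = 0
--     while atk and dfd:
--         a = max(atk)
--         d = max(dfd)
--         atk.remove(a)
--         dfd.remove(d)
--         if a > d:
--             defender_lost += 1
--         else:
--             attacker_lost += 1
--     return (attacker_lost, defender_lost)
-- ===== Notes on version B (the rewrite author's own statement) =====
-- stated objective: alternative
-- what changed: Replaces sort-reverse-zip with a selection-based round-by-round simulation: repeatedly extract the maximum of each army with max()/remove(), compare the pair and charge the loser, until one army is exhausted; correct because pairing current maxima round by round produces exactly the pairs of the descending-sorted zip.
import Mathlib
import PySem

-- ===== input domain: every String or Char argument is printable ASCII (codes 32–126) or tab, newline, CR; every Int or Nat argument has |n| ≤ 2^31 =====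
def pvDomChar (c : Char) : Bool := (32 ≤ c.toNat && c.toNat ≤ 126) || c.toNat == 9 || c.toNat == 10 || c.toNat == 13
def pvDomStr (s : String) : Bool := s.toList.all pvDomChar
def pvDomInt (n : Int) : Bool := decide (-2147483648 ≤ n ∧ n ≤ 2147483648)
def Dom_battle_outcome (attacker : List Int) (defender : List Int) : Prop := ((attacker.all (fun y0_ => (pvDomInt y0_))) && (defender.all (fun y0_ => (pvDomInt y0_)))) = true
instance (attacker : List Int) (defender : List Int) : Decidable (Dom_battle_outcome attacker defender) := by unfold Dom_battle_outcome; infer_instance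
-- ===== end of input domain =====

-- B plays the battle round by round — repeatedly extract the maximum from each army,
-- compare, and remove both — instead of sorting, reversing and zipping; alternative
-- selection-based algorithm (no sort), same results.


-- ===== PORT A =====
-- sorted(xs)[::-1] is ported as (sorted xs).reverse; exact on a full list
def battle_outcome (attacker : List Int) (defender : List Int) : Int × Int :=
  let st := (((PySem.List.sorted attacker (fun x => x) false).reverse).zip
             ((PySem.List.sorted defender (fun x => x) false).reverse)).foldl
    (fun (acc : Int × Int) p =>
      if p.1 > p.2 then (acc.1, acc.2 + 1)
      else if p.1 ≤ p.2 then (acc.1 + 1, acc.2)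
      else acc) (0, 0)
  (st.1, st.2)

-- ===== PORT B =====
-- needed by the port's decreasing_by: max(x::xs) (the running-max loop) is a member
theorem foldl_max_mem (xs : List Int) (x : Int) : xs.foldl max x ∈ x :: xs := by
  induction xs generalizing x with
  | nil => simp
  | cons y ys ih =>
    simp only [List.foldl_cons]
    rcases List.mem_cons.mp (ih (max x y)) with h | h
    · rw [h]; rcases max_choice x y with hm | hm <;> simp [hm]
    · simp [h]

-- B's while-loop: Python max(xs) is the running-max loop (PySem.List.max?_id_cons),
-- and list.remove of a present value is List.erase (PySem.List.remove?_eq_some_erase).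
def battleAux : List Int → List Int → Int → Int → Int × Int
  | [], _, aL, dL => (aL, dL)
  | _ :: _, [], aL, dL => (aL, dL)
  | x :: xs, y :: ys, aL, dL =>
      let a := xs.foldl max x
      let d := ys.foldl max y
      if a > d then battleAux ((x :: xs).erase a) ((y :: ys).erase d) aL (dL + 1)
      else battleAux ((x :: xs).erase a) ((y :: ys).erase d) (aL + 1) dL
termination_by atk _ _ _ => atk.length
decreasing_by
  all_goals
    simp [List.length_erase_of_mem (foldl_max_mem xs x)]

def battle_outcome_alt (attacker : List Int) (defender : List Int) : Int × Int :=
  battleAux attacker defender 0 0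

-- ===== PRECONDITION & SPEC =====
def Spec_battle_outcome (attacker : List Int) (defender : List Int) (out : Int × Int) : Prop := out = battle_outcome_alt attacker defender
instance (attacker : List Int) (defender : List Int) (out : Int × Int) : Decidable (Spec_battle_outcome attacker defender out) := by unfold Spec_battle_outcome; infer_instance

-- ===== CLAIM (what is proved, stated in full; the proofs are below) =====
def Claim_equal_battle_outcome : Prop := ∀ (attacker : List Int) (defender : List Int), Dom_battle_outcome attacker defender → Spec_battle_outcome attacker defender (battle_outcome attacker defender)

-- ===== LEMMAS AND PROOFS =====

-- the zipped descending lists A's loop runs over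
def descZip (xs ys : List Int) : List (Int × Int) :=
  ((PySem.List.sorted xs (fun x => x) false).reverse).zip
    ((PySem.List.sorted ys (fun x => x) false).reverse)

-- A's loop adds the count of (a ≤ d) pairs to the first accumulator and the count of
-- (a > d) pairs to the second.
theorem battle_loop_counts (l : List (Int × Int)) (x y : Int) :
    l.foldl (fun (acc : Int × Int) p =>
      if p.1 > p.2 then (acc.1, acc.2 + 1)
      else if p.1 ≤ p.2 then (acc.1 + 1, acc.2)
      else acc) (x, y)
    = (x + (l.countP (fun p => decide (p.1 ≤ p.2)) : Nat), y + (l.countP (fun p => decide (p.2 < p.1)) : Nat)) := by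
  induction l generalizing x y with
  | nil => simp
  | cons p t ih =>
    simp only [List.foldl_cons, List.countP_cons]
    by_cases h : p.1 > p.2
    · rw [if_pos h, ih]
      simp [h, not_le.mpr h, Prod.ext_iff]
      ring
    · rw [if_neg h, if_pos (not_lt.mp h), ih]
      simp [not_lt.mp h, h, Prod.ext_iff]
      ring

-- the initial accumulator is ≤ the running max
theorem init_le_foldl_max (xs : List Int) (x : Int) : x ≤ xs.foldl max x := by
  induction xs generalizing x with
  | nil => simp
  | cons y ys ih =>
    simp only [List.foldl_cons]
    exact (le_max_left x y).trans (ih (max x y))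

-- every element is ≤ the running max
theorem le_foldl_max' (xs : List Int) (x z : Int) (hz : z ∈ x :: xs) :
    z ≤ xs.foldl max x := by
  induction xs generalizing x with
  | nil =>
    rw [List.mem_singleton] at hz
    simp [hz]
  | cons y ys ih =>
    simp only [List.foldl_cons]
    rcases List.mem_cons.mp hz with h | h
    · exact h.le.trans ((le_max_left x y).trans (init_le_foldl_max ys (max x y)))
    · rcases List.mem_cons.mp h with h2 | h2
      · exact h2.le.trans ((le_max_right x y).trans (init_le_foldl_max ys (max x y)))
      · exact ih (max x y) (List.mem_cons_of_mem _ h2)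

-- peeling the maximum: sorted(xs) = sorted(xs minus one copy of its max) ++ [max]
theorem sorted_erase_max (x : Int) (xs : List Int) :
    PySem.List.sorted (x :: xs) (fun v => v) false
      = PySem.List.sorted ((x :: xs).erase (xs.foldl max x)) (fun v => v) false
          ++ [xs.foldl max x] := by
  set m := xs.foldl max x with hm
  have hmem : m ∈ x :: xs := foldl_max_mem xs x
  refine PySem.List.sorted_id_eq_of_perm_of_pairwise _ _ ?_ ?_
  · have p1 : List.Perm (PySem.List.sorted ((x :: xs).erase m) (fun v => v) false ++ [m])
        ((x :: xs).erase m ++ [m]) := (PySem.List.sorted_perm _ _ _).append_right _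
    have p2 : List.Perm ((x :: xs).erase m ++ [m]) (m :: (x :: xs).erase m) :=
      List.perm_append_singleton _ _
    have p3 : List.Perm (m :: (x :: xs).erase m) (x :: xs) :=
      (List.perm_cons_erase hmem).symm
    exact (p1.trans p2).trans p3
  · rw [List.pairwise_append]
    refine ⟨PySem.List.sorted_pairwise _ _, List.pairwise_singleton _ _, ?_⟩
    intro a ha b hb
    rw [List.mem_singleton] at hb
    subst hb
    have ha2 : a ∈ (x :: xs).erase m := (PySem.List.sorted_perm _ _ _).mem_iff.mp ha
    have : a ∈ x :: xs := List.erase_subset ha2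
    exact le_foldl_max' xs x a this

-- B's round-by-round loop computes the same two counts as A's loop over descZip.
theorem battleAux_eq (xs ys : List Int) (aL dL : Int) :
    battleAux xs ys aL dL
      = (aL + ((descZip xs ys).countP (fun p => decide (p.1 ≤ p.2)) : Nat),
         dL + ((descZip xs ys).countP (fun p => decide (p.2 < p.1)) : Nat)) := by
  induction hn : xs.length using Nat.strong_induction_on generalizing xs ys aL dL with
  | _ n ih =>
  match xs, ys with
  | [], ys =>
      simp [battleAux, descZip, PySem.List.sorted]
  | x :: xs, [] =>
      simp [battleAux, descZip, PySem.List.sorted]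
  | x :: xs, y :: ys =>
      have hA := sorted_erase_max x xs
      have hD := sorted_erase_max y ys
      have hz : descZip (x :: xs) (y :: ys)
          = (xs.foldl max x, ys.foldl max y)
              :: descZip ((x :: xs).erase (xs.foldl max x)) ((y :: ys).erase (ys.foldl max y)) := by
        unfold descZip
        rw [hA, hD]
        simp
      have hlen : ((x :: xs).erase (xs.foldl max x)).length < n := by
        have h1 : xs.length + 1 = n := by simpa using hn
        rw [List.length_erase_of_mem (foldl_max_mem xs x)]
        simp
        omega
      rw [show battleAux (x :: xs) (y :: ys) aL dL =
          (if xs.foldl max x > ys.foldl max y then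
            battleAux ((x :: xs).erase (xs.foldl max x)) ((y :: ys).erase (ys.foldl max y)) aL (dL + 1)
          else
            battleAux ((x :: xs).erase (xs.foldl max x)) ((y :: ys).erase (ys.foldl max y)) (aL + 1) dL)
        from by rw [battleAux]]
      rw [hz]
      by_cases h : xs.foldl max x > ys.foldl max y
      · rw [if_pos h, ih _ hlen _ _ _ _ rfl]
        simp [h, not_le.mpr h, Prod.ext_iff]
        ring
      · rw [if_neg h, ih _ hlen _ _ _ _ rfl]
        simp [h, not_lt.mp h, Prod.ext_iff]
        ring

-- ===== VERDICT (by name: the statement is the Claim_ definition above) =====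
theorem battle_outcome_spec : Claim_equal_battle_outcome := by
  intro attacker defender _
  unfold Spec_battle_outcome battle_outcome battle_outcome_alt
  rw [battleAux_eq]
  rw [battle_loop_counts]
  simp [descZip]
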